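-- pv_equiv track=rewrite | github.com/harshS02-coder/Study-Buddy-Jawab-AI | study-buddy-backend/file_processor.py | invoice_chunker
-- ===== SOURCE A (Python) =====
-- def invoice_chunker(text: str) -> list[str]:
--     sections = []
--     keywords = [
--         "invoice",
--         "bill to",
--         "vendor",
--         "total",
--         "tax",
--         "gst",
--         "amount",
--         "payment"
--     ]
--
--     lines = text.split("\n")
--     buffer = ""
--
--     for line in lines:
--         buffer += line + " "
--         if any(k in line.lower() for k in keywords):
--             sections.append(buffer.strip())
--             buffer = ""
--
--     if buffer.strip():
--         sections.append(buffer.strip())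
--
--     return sections
-- ===== SOURCE B (Python) =====
-- def invoice_chunker(text: str) -> list[str]:
--     keywords = [
--         "invoice",
--         "bill to",
--         "vendor",
--         "total",
--         "tax",
--         "gst",
--         "amount",
--         "payment"
--     ]
--     lines = text.split("\n")
--     # phase 1: indices of the keyword (flush) lines
--     bounds = [i for i, line in enumerate(lines)
--               if any(k in line.lower() for k in keywords)]
--     # phase 2: slice between consecutive boundaries and join
--     sections = []
--     prev = 0
--     for b in bounds:
--         sections.append(" ".join(lines[prev:b + 1]).strip())
--         prev = b + 1
--     tail = " ".join(lines[prev:]).strip()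
--     if tail:
--         sections.append(tail)
--     return sections
-- ===== Notes on version B (the rewrite author's own statement) =====
-- stated objective: alternative
-- what changed: Replaces A's running string buffer (append each line plus a space, flush on keyword lines) by a two-phase shape: first collect the indices of all keyword lines, then build each section by slicing the line list between consecutive boundaries and joining with single spaces.
import Mathlib
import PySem

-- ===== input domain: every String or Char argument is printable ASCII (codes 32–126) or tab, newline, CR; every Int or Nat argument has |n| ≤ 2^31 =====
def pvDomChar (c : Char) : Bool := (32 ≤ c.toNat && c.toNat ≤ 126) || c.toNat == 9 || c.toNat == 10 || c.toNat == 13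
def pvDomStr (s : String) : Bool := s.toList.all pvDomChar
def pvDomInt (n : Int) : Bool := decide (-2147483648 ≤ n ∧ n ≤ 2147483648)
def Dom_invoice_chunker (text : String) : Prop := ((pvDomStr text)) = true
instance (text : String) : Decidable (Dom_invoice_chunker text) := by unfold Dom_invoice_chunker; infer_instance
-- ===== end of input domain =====

-- B replaces A's running string buffer by a two-phase shape (collect keyword-line indices, then slice-and-join);
-- objective: alternative decomposition, same cost; equivalence proved on all inputs.

-- shared keyword test (same literal list in both Pythons)
def pvKeywords : List (List Char) :=
  ["invoice".toList, "bill to".toList, "vendor".toList, "total".toList,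
   "tax".toList, "gst".toList, "amount".toList, "payment".toList]

def pvFlush (line : List Char) : Bool :=
  pvKeywords.any (fun k => PySem.Chars.isIn k (PySem.Chars.lower line))

-- ===== PORT A =====
-- loop body of A: buffer += line + " "; flush on keyword line
def pvAStep (st : List (List Char) × List Char) (line : List Char) :
    List (List Char) × List Char :=
  let buf := st.2 ++ line ++ [' ']
  if pvFlush line then (st.1 ++ [PySem.Chars.strip buf], []) else (st.1, buf)

-- A's epilogue: if buffer.strip(): sections.append(buffer.strip())
def pvAFin (st : List (List Char) × List Char) : List (List Char) :=
  if (PySem.Chars.strip st.2).isEmpty then st.1 else st.1 ++ [PySem.Chars.strip st.2]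

def invoice_chunker (text : String) : List String :=
  let lines := PySem.Chars.splitOn text.toList ['\n']
  (pvAFin (lines.foldl pvAStep ([], []))).map String.ofList

-- ===== PORT B =====
-- loop body of B's phase 2: sections.append(" ".join(lines[prev:b+1]).strip()); prev = b+1
def pvBStep (lines : List (List Char)) (st : List (List Char) × Int) (b : Int) :
    List (List Char) × Int :=
  (st.1 ++ [PySem.Chars.strip (PySem.Chars.join [' '] (PySem.List.slice lines (some st.2) (some (b + 1))))],
   b + 1)

-- B's epilogue: tail = " ".join(lines[prev:]).strip(); if tail: sections.append(tail)
def pvBFin (lines : List (List Char)) (st : List (List Char) × Int) : List (List Char) :=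
  let tail := PySem.Chars.strip (PySem.Chars.join [' '] (PySem.List.slice lines (some st.2) none))
  if tail.isEmpty then st.1 else st.1 ++ [tail]

def invoice_chunker_alt (text : String) : List String :=
  let lines := PySem.Chars.splitOn text.toList ['\n']
  let bounds := ((PySem.List.enumerate lines 0).filter (fun p => pvFlush p.2)).map (·.1)
  (pvBFin lines (bounds.foldl (pvBStep lines) ([], 0))).map String.ofList

-- ===== PRECONDITION & SPEC =====
def Spec_invoice_chunker (text : String) (out : List String) : Prop := out = invoice_chunker_alt text
instance (text : String) (out : List String) : Decidable (Spec_invoice_chunker text out) := by unfold Spec_invoice_chunker; infer_instance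

-- ===== CLAIM (what is proved, stated in full; the proofs are below) =====
def Claim_equal_invoice_chunker : Prop := ∀ (text : String), Dom_invoice_chunker text → Spec_invoice_chunker text (invoice_chunker text)

-- ===== LEMMAS AND PROOFS =====

-- the char buffer A carries over the group g of unflushed lines: each line plus a trailing space
def pvFlat (g : List (List Char)) : List Char := (g.map (· ++ [' '])).flatten

theorem pvFlat_append_singleton (g : List (List Char)) (l : List Char) :
    pvFlat (g ++ [l]) = pvFlat g ++ (l ++ [' ']) := by
  simp [pvFlat]

theorem pvJoinFlat (g : List (List Char)) (l : List Char) :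
    PySem.Chars.join [' '] (g ++ [l]) = pvFlat g ++ l := by
  induction g with
  | nil => simp [pvFlat, PySem.Chars.join_singleton]
  | cons a g ih =>
    rcases g with _ | ⟨b, g'⟩
    · simp [pvFlat, PySem.Chars.join_cons_cons, PySem.Chars.join_singleton]
    · simp only [List.cons_append] at ih ⊢
      rw [PySem.Chars.join_cons_cons, ih]
      simp [pvFlat]

theorem pvStripSpace (s : List Char) :
    PySem.Chars.strip (s ++ [' ']) = PySem.Chars.strip s := by
  simp only [PySem.Chars.strip, PySem.Chars.lstrip, PySem.Chars.rstrip]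
  rw [List.dropWhile_append]
  by_cases h : (List.dropWhile PySem.Chars.isspace s).isEmpty
  · simp [List.isEmpty_iff.mp h, PySem.Chars.isspace]
  · simp only [h, if_neg, Bool.false_eq_true, not_false_iff]
    simp [PySem.Chars.isspace]

theorem pvStripFlat (g : List (List Char)) :
    PySem.Chars.strip (pvFlat g) = PySem.Chars.strip (PySem.Chars.join [' '] g) := by
  rcases List.eq_nil_or_concat g with rfl | ⟨g', l, rfl⟩
  · simp [pvFlat, PySem.Chars.join_nil]
  · simp only [List.concat_eq_append]
    rw [pvJoinFlat, pvFlat_append_singleton, ← List.append_assoc, pvStripSpace]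

theorem pvTakeLen {α : Type} (xs : List α) (l : α) (ls : List α) :
    (xs ++ l :: ls).take (xs.length + 1) = xs ++ [l] := by
  simp [List.take_append]

-- main invariant: A's remaining fold with buffer = pvFlat of the pending group equals
-- B's fold over the keyword indices of the remaining lines
theorem pvMain (L : List (List Char)) (ls : List (List Char)) :
    ∀ (pre : List (List Char)) (secs : List (List Char)) (start : Nat),
    L = pre ++ ls → start ≤ pre.length →
    pvAFin (ls.foldl pvAStep (secs, pvFlat (pre.drop start))) =
    pvBFin L ((((PySem.List.enumerate ls (pre.length : Int)).filter
        (fun p => pvFlush p.2)).map (·.1)).foldl (pvBStep L) (secs, (start : Int))) := by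
  induction ls with
  | nil =>
    intro pre secs start hL hs
    subst hL
    simp only [List.foldl_nil, PySem.List.enumerate_nil, List.filter_nil, List.map_nil,
      List.append_nil]
    rw [pvBFin, PySem.List.slice_from_natCast, pvAFin, pvStripFlat]
  | cons l ls ih =>
    intro pre secs start hL hs
    rw [PySem.List.enumerate_cons]
    by_cases hf : pvFlush l
    · -- flush line: both sides emit the same section
      have hslice : PySem.List.slice L (some (start : Int)) (some ((pre.length : Int) + 1))
          = pre.drop start ++ [l] := by
        have : ((pre.length : Int) + 1) = ((pre.length + 1 : Nat) : Int) := by push_cast; ring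
        rw [this, PySem.List.slice_natCast, hL, List.drop_append_of_le_length hs]
        have hlen : pre.length + 1 - start = (pre.drop start).length + 1 := by
          simp [List.length_drop]; omega
        rw [hlen, pvTakeLen]
      have hsec : PySem.Chars.strip (PySem.Chars.join [' '] (pre.drop start ++ [l]))
          = PySem.Chars.strip (pvFlat (pre.drop start) ++ l ++ [' ']) := by
        rw [pvJoinFlat, pvStripSpace]
      simp only [List.foldl_cons, pvAStep, hf, if_true, List.filter_cons, List.map_cons,
        pvBStep, hslice, hsec]
      have h2 : (((pre ++ [l]).length : Nat) : Int) = (pre.length : Int) + 1 := by simp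
      have h3 : pvFlat ((pre ++ [l]).drop (pre.length + 1)) = [] := by simp [pvFlat]
      have h4 : ((pre.length + 1 : Nat) : Int) = (pre.length : Int) + 1 := by push_cast; ring
      have := ih (pre ++ [l])
        (secs ++ [PySem.Chars.strip (pvFlat (pre.drop start) ++ l ++ [' '])])
        (pre.length + 1) (by simp [hL]) (by simp)
      rw [h3, h2, h4] at this
      exact this
    · -- ordinary line: A extends the buffer, B's index list skips it
      simp only [List.foldl_cons, pvAStep, hf, if_false, List.filter_cons,
        Bool.false_eq_true, decide_eq_true_eq]
      have hbuf : pvFlat (pre.drop start) ++ l ++ [' '] = pvFlat ((pre ++ [l]).drop start) := by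
        rw [List.drop_append_of_le_length hs, pvFlat_append_singleton, List.append_assoc]
      have h2 : (((pre ++ [l]).length : Nat) : Int) = (pre.length : Int) + 1 := by simp
      have := ih (pre ++ [l]) secs start (by simp [hL]) (by simp; omega)
      rw [← hbuf, h2] at this
      exact this

-- ===== VERDICT (by name: the statement is the Claim_ definition above) =====
theorem invoice_chunker_spec : Claim_equal_invoice_chunker := by
  intro text _
  unfold Spec_invoice_chunker
  have := pvMain (PySem.Chars.splitOn text.toList ['\n'])
    (PySem.Chars.splitOn text.toList ['\n']) [] [] 0 (by simp) (by simp)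
  simp only [List.drop_nil, pvFlat, List.map_nil, List.flatten_nil, List.length_nil,
    Nat.cast_zero] at this
  simp only [invoice_chunker, invoice_chunker_alt]
  rw [this]
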